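-- pv_equiv track=rewrite | github.com/mmvergara/mmv-dsa | possibleSum.py | solve
-- ===== SOURCE A (Python) =====
-- def solve(amount, nums, idx=0):
--     nums.sort(reverse=True)
--
--     def rec(s=0, idx=0):
--         if s == amount:
--             return True
--
--         if s > amount:
--             return False
--
--         for i in range(idx, len(nums)):
--             if rec(s + nums[i], idx + 1):
--                 return True
--         return False
--
--     return rec()
-- ===== SOURCE B (Python) =====
-- def solve(amount, nums, idx=0):
--     # Same in-place descending sort side effect as A; return value is what's proved.
--     nums.sort(reverse=True)
--     memo = {}
--
--     def go(s, d):
--         if s == amount: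
--             return True
--         if s > amount:
--             return False
--         key = (s, d)
--         if key in memo:
--             return memo[key]
--         res = False
--         for x in nums[d:]:
--             if go(s + x, d + 1):
--                 res = True
--                 break
--         memo[key] = res
--         return res
--
--     return go(0, 0)
-- ===== Notes on version B (the rewrite author's own statement) =====
-- stated objective: faster
-- what changed: Replaces A's pure exponential backtracking by dynamic programming: the recursion is keyed on its (sum, depth) state and memoized in a dict, so each reachable state is expanded once; intended as faster (pseudo-polynomial vs exponential) — in a timing run A timed out at n=16 where B returned, so no ratio at the largest size could be measured.
import Mathlib
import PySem

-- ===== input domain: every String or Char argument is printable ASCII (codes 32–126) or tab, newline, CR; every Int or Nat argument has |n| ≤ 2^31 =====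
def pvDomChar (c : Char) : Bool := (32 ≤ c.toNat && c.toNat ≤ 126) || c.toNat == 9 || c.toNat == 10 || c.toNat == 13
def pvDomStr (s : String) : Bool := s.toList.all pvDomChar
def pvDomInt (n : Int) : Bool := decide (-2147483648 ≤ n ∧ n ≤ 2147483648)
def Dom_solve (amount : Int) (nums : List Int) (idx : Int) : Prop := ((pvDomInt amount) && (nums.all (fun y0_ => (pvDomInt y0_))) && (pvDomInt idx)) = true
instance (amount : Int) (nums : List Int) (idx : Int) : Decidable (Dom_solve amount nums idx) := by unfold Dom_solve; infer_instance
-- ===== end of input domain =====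

-- B memoizes A's backtracking recursion on its (sum, depth) state (dynamic programming; intended as
-- faster: in a timing run A timed out at n=16 where B returned, no ratio measurable; same
-- exploration order); both Pythons sort `nums` in place (same side effect); theorems are about the return value.

-- ===== PORT A =====
-- rec(s, idx): all recursive calls use idx+1, so fuel is nums.length - idx;
-- the `if h :` guard only realises that the for-loop over range(idx, len(nums)) is empty when idx ≥ len.
def solveRecA (amount : Int) (nums : List Int) (s : Int) (idx : Nat) : Bool :=
  if s = amount then true
  else if s > amount then false
  else if h : idx < nums.length then
    -- for i in range(idx, len(nums)): if rec(s + nums[i], idx + 1): return True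
    (List.range' idx (nums.length - idx)).any
      (fun i => solveRecA amount nums (s + nums.getD i 0) (idx + 1))  -- nums[i], i always in range
  else false
termination_by nums.length - idx
decreasing_by omega

def solve (amount : Int) (nums : List Int) (idx : Int) : Bool :=
  solveRecA amount (PySem.List.sorted nums (fun x => x) true) 0 0

-- ===== PORT B =====
-- go(s, d) with the memo dict threaded through; fuel k encodes d as nums.length - k
-- (every reachable call has k ≤ nums.length, so d is Python's depth); the k = 0 branch is
-- the empty `for x in nums[d:]` loop at d = len(nums).
mutual
def goB (amount : Int) (nums : List Int) (k : Nat) (s : Int)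
    (memo : PySem.Dict (Int × Nat) Bool) : Bool × PySem.Dict (Int × Nat) Bool :=
  if s = amount then (true, memo)
  else if s > amount then (false, memo)
  else
    match PySem.Dict.get? memo (s, nums.length - k) with
    | some b => (b, memo)                                   -- if key in memo: return memo[key]
    | none =>
      -- res = False; for x in nums[d:]: if go(s + x, d + 1): res = True; break
      let p := goAny amount nums (k - 1) (nums.drop (nums.length - k)) s memo
      (p.1, PySem.Dict.insert p.2 (s, nums.length - k) p.1) -- memo[key] = res
termination_by (k, 1)
decreasing_by all_goals (simp [Prod.lex_def, List.length_drop]; omega)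

def goAny (amount : Int) (nums : List Int) (k : Nat) (xs : List Int) (s : Int)
    (memo : PySem.Dict (Int × Nat) Bool) : Bool × PySem.Dict (Int × Nat) Bool :=
  match xs with
  | [] => (false, memo)
  | x :: rest =>
    let p := goB amount nums k (s + x) memo
    if p.1 then (true, p.2) else goAny amount nums k rest s p.2
termination_by (k, 2 * xs.length)
decreasing_by all_goals (simp [Prod.lex_def]; try omega)
end

def solve_alt (amount : Int) (nums : List Int) (idx : Int) : Bool :=
  let ns := PySem.List.sorted nums (fun x => x) true
  (goB amount ns ns.length 0 PySem.Dict.empty).1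

-- ===== PRECONDITION & SPEC =====
def Spec_solve (amount : Int) (nums : List Int) (idx : Int) (out : Bool) : Prop := out = solve_alt amount nums idx
instance (amount : Int) (nums : List Int) (idx : Int) (out : Bool) : Decidable (Spec_solve amount nums idx out) := by unfold Spec_solve; infer_instance

-- ===== CLAIM (what is proved, stated in full; the proofs are below) =====
def Claim_equal_solve : Prop := ∀ (amount : Int) (nums : List Int) (idx : Int), Dom_solve amount nums idx → Spec_solve amount nums idx (solve amount nums idx)

-- ===== LEMMAS AND PROOFS =====

lemma bool_eq_of_iff {a b : Bool} (h : a = true ↔ b = true) : a = b := by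
  cases a <;> cases b <;> simp_all

lemma mem_drop_iff_getD (nums : List Int) (d : Nat) (x : Int) :
    x ∈ nums.drop d ↔ ∃ i, d ≤ i ∧ i < nums.length ∧ nums.getD i 0 = x := by
  constructor
  · intro hx
    rcases List.mem_iff_getElem.1 hx with ⟨j, hj, hje⟩
    refine ⟨d + j, Nat.le_add_right _ _, ?_, ?_⟩
    · have := List.length_drop (l := nums) (i := d); omega
    · have hlt : d + j < nums.length := by
        have := List.length_drop (l := nums) (i := d); omega
      rw [List.getD_eq_getElem _ _ hlt, ← hje, List.getElem_drop]
  · rintro ⟨i, hdi, hil, hie⟩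
    have hj : i - d < (nums.drop d).length := by simp [List.length_drop]; omega
    have : (nums.drop d)[i - d] = x := by
      rw [List.getElem_drop, ← List.getD_eq_getElem _ 0 (by omega : d + (i - d) < nums.length)]
      rw [show d + (i - d) = i by omega]; exact hie
    exact this ▸ List.getElem_mem hj

lemma recA_ge (amount : Int) (nums : List Int) (s : Int) (d : Nat) (h : nums.length ≤ d) :
    solveRecA amount nums s d = decide (s = amount) := by
  rw [solveRecA]
  split_ifs with h1 h2 h3 <;> simp_all

-- A's inner for-loop over indices equals an `any` over the suffix nums[d:]
lemma any_range'_eq_any_drop (nums : List Int) (d : Nat) (f : Int → Bool) :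
    (List.range' d (nums.length - d)).any (fun i => f (nums.getD i 0)) = (nums.drop d).any f := by
  apply bool_eq_of_iff
  rw [List.any_eq_true, List.any_eq_true]
  constructor
  · rintro ⟨i, hi, hf⟩
    rw [List.mem_range'_1] at hi
    exact ⟨nums.getD i 0, (mem_drop_iff_getD nums d _).2 ⟨i, by omega, by omega, rfl⟩, hf⟩
  · rintro ⟨x, hx, hf⟩
    rcases (mem_drop_iff_getD nums d x).1 hx with ⟨i, hdi, hil, hie⟩
    exact ⟨i, by rw [List.mem_range'_1]; omega, by rw [hie]; exact hf⟩

-- the memo invariant: every stored entry is the value of A's (pure) recursion at that state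
def MemoInv (amount : Int) (nums : List Int) (memo : PySem.Dict (Int × Nat) Bool) : Prop :=
  ∀ s d b, memo.get? (s, d) = some b → b = solveRecA amount nums s d

lemma memoInv_insert (amount : Int) (nums : List Int) (memo : PySem.Dict (Int × Nat) Bool)
    (s : Int) (d : Nat) (b : Bool) (hm : MemoInv amount nums memo)
    (hb : b = solveRecA amount nums s d) :
    MemoInv amount nums (PySem.Dict.insert memo (s, d) b) := by
  intro s' d' b' h
  rw [PySem.Dict.get?_insert] at h
  split_ifs at h with he
  · cases h
    have : s' = s ∧ d' = d := by simpa [Prod.ext_iff] using he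
    rw [this.1, this.2]; exact hb
  · exact hm s' d' b' h

lemma goB_spec (amount : Int) (nums : List Int) :
    ∀ k, k ≤ nums.length → ∀ s memo, MemoInv amount nums memo →
      (goB amount nums k s memo).1 = solveRecA amount nums s (nums.length - k) ∧
      MemoInv amount nums (goB amount nums k s memo).2 := by
  intro k
  induction k with
  | zero =>
    intro _ s memo hm
    rw [goB]
    by_cases h1 : s = amount
    · rw [if_pos h1]
      exact ⟨by rw [recA_ge _ _ _ _ (by omega)]; simp [h1], hm⟩
    rw [if_neg h1]
    by_cases h2 : s > amount
    · rw [if_pos h2]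
      exact ⟨by rw [recA_ge _ _ _ _ (by omega)]; simp [h1], hm⟩
    rw [if_neg h2]
    simp only []
    cases hg : PySem.Dict.get? memo (s, nums.length - 0) with
    | some b => exact ⟨by simpa using hm s _ b hg, hm⟩
    | none =>
      have hd0 : List.drop (nums.length - 0) nums = [] := by simp
      have hga : goAny amount nums (0 - 1) (List.drop (nums.length - 0) nums) s memo
          = (false, memo) := by rw [hd0, goAny]
      rw [hga]
      refine ⟨?_, memoInv_insert _ _ _ _ _ _ hm ?_⟩ <;>
        (rw [recA_ge _ _ _ _ (by omega)]; simp [h1])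
  | succ k' ih =>
    intro hk s memo hm
    have hd : nums.length - (k' + 1) < nums.length := by omega
    have hd1 : nums.length - (k' + 1) + 1 = nums.length - k' := by omega
    -- inner loop lemma at fuel k', by induction on the suffix being scanned
    have hany : ∀ xs s' memo', MemoInv amount nums memo' →
        (goAny amount nums k' xs s' memo').1 =
          xs.any (fun x => solveRecA amount nums (s' + x) (nums.length - k')) ∧
        MemoInv amount nums (goAny amount nums k' xs s' memo').2 := by
      intro xs
      induction xs with
      | nil => intro s' memo' hm'; rw [goAny]; exact ⟨rfl, hm'⟩
      | cons x rest ihxs =>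
        intro s' memo' hm'
        rw [goAny]
        obtain ⟨hb1, hb2⟩ := ih (by omega) (s' + x) memo' hm'
        by_cases hx : (goB amount nums k' (s' + x) memo').1 = true
        · rw [if_pos hx]
          refine ⟨?_, hb2⟩
          rw [List.any_cons, ← hb1, hx]; rfl
        · rw [if_neg hx]
          obtain ⟨hr1, hr2⟩ := ihxs s' _ hb2
          refine ⟨?_, hr2⟩
          rw [List.any_cons, ← hb1, Bool.eq_false_iff.2 hx, hr1]; rfl
    rw [goB]
    by_cases h1 : s = amount
    · rw [if_pos h1]
      exact ⟨by rw [solveRecA]; simp [h1], hm⟩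
    rw [if_neg h1]
    by_cases h2 : s > amount
    · rw [if_pos h2]
      exact ⟨by rw [solveRecA, if_neg h1, if_pos h2], hm⟩
    rw [if_neg h2]
    cases hg : PySem.Dict.get? memo (s, nums.length - (k' + 1)) with
    | some b => exact ⟨by simpa using hm s _ b hg, hm⟩
    | none =>
      obtain ⟨ha1, ha2⟩ := hany (nums.drop (nums.length - (k' + 1))) s memo hm
      have hval : (goAny amount nums k' (nums.drop (nums.length - (k' + 1))) s memo).1 =
          solveRecA amount nums s (nums.length - (k' + 1)) := by
        rw [ha1, solveRecA, if_neg h1, if_neg h2, dif_pos hd, hd1,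
          any_range'_eq_any_drop nums (nums.length - (k' + 1))
            (fun x => solveRecA amount nums (s + x) (nums.length - k'))]
      exact ⟨hval, memoInv_insert _ _ _ _ _ _ ha2 hval⟩

-- ===== VERDICT (by name: the statement is the Claim_ definition above) =====
theorem solve_spec : Claim_equal_solve := by
  intro amount nums idx _
  unfold Spec_solve solve solve_alt
  set ns := PySem.List.sorted nums (fun x => x) true with hns
  have hempty : MemoInv amount ns PySem.Dict.empty := by
    intro s d b h; rw [PySem.Dict.get?_empty] at h; cases h
  have h := (goB_spec amount ns ns.length le_rfl 0 PySem.Dict.empty hempty).1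
  rw [h, Nat.sub_self]
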